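-- pv_equiv track=rewrite | github.com/river0tter/JIE | .ipynb_checkpoints/data_utils-checkpoint.py | token_start_end
-- ===== SOURCE A (Python) =====
-- def token_start_end(tokenizedTokens, target):
--     if not target:
--         return 0,0
--     target_len = len(target)
--     for i, t in enumerate(tokenizedTokens):
--         if t == target[0] and i <= len(tokenizedTokens)-target_len:
--             if(target == tokenizedTokens[i:i+target_len]):
--                 return (i, i+target_len)
--     return 0,0
-- ===== SOURCE B (Python) =====
-- def token_start_end(tokenizedTokens, target):
--     # Rabin–Karp: rolling window hash over per-token hashes; verify a slice only on hash hit.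
--     if not target:
--         return 0, 0
--     n = len(tokenizedTokens)
--     m = len(target)
--     if m > n:
--         return 0, 0
--     MOD = 1000000007
--     BASE = 1000003
--
--     def token_hash(tok):
--         h = 0
--         for c in tok:
--             h = (h * 131 + ord(c)) % MOD
--         return h
--
--     def seq_hash(xs):
--         h = 0
--         for x in xs:
--             h = (h * BASE + x) % MOD
--         return h
--
--     hs = [token_hash(t) for t in tokenizedTokens]
--     tgt_h = seq_hash([token_hash(t) for t in target])
--     w = seq_hash(hs[:m])
--     pw = pow(BASE, m - 1, MOD)
--     for i in range(n - m + 1):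
--         if w == tgt_h and tokenizedTokens[i:i + m] == target:
--             return i, i + m
--         if i + m < n:
--             w = ((w - hs[i] * pw) * BASE + hs[i + m]) % MOD
--     return 0, 0
-- ===== Notes on version B (the rewrite author's own statement) =====
-- stated objective: alternative
-- what changed: B is a Rabin-Karp search: it precomputes per-token hashes and a rolling window hash over them and compares a slice against the target only when the window hash equals the target hash, instead of A's per-index first-token check plus slice comparison.
import Mathlib
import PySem

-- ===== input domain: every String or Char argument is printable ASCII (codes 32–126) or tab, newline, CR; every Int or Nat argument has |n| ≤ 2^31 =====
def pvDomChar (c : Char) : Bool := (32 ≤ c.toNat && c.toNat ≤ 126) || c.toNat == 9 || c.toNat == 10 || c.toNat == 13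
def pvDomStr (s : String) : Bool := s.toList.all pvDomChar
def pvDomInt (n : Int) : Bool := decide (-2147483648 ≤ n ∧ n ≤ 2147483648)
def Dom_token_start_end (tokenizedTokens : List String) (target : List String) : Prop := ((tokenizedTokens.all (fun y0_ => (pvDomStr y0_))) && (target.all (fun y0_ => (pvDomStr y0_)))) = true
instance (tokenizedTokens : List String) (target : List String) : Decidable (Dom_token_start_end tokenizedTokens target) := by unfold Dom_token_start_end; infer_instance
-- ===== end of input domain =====

-- B replaces A's per-index first-token check + slice comparison by a Rabin–Karp search
-- (per-token hashes, a rolling window hash, slice verification only on a hash hit);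
-- objective: alternative — same return value on every input, no speed is claimed.

-- ===== PORT A =====
-- the for-loop over enumerate(tokenizedTokens): i is the index, the list argument is the rest still to visit
def tokenA_go (toks target : List String) : Nat → List String → List Int
  | _, [] => [0, 0]
  | i, t :: rest =>
    if t = target.headI ∧ (i : Int) ≤ (toks.length : Int) - (target.length : Int) then
      if target = PySem.List.slice toks (some (i : Int)) (some ((i : Int) + (target.length : Int))) then
        [(i : Int), (i : Int) + (target.length : Int)]
      else tokenA_go toks target (i + 1) rest
    else tokenA_go toks target (i + 1) rest

def token_start_end (tokenizedTokens : List String) (target : List String) : List Int :=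
  if target = [] then [0, 0]
  else tokenA_go tokenizedTokens target 0 tokenizedTokens

-- ===== PORT B =====
def pvMOD : Int := 1000000007
def pvBASE : Int := 1000003

-- h = (h * 131 + ord(c)) % MOD over the characters of the token
def tokenHash (tok : String) : Int :=
  tok.toList.foldl (fun h c => PySem.Int.mod (h * 131 + (c.toNat : Int)) pvMOD) 0

-- h = (h * BASE + x) % MOD over a list of token hashes
def seqHash (xs : List Int) : Int :=
  xs.foldl (fun h x => PySem.Int.mod (h * pvBASE + x) pvMOD) 0

-- pow(BASE, m-1, MOD): Python's three-argument pow, ported as modular power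
def pvPowMod (b : Int) (e : Nat) (mo : Int) : Int := PySem.Int.mod (b ^ e) mo

-- the for-loop over range(n-m+1); w is the rolling window hash;
-- hs.getD i 0: hs[i] — the loop only reads indices < n, always in range
def tokenB_go (toks target : List String) (hs : List Int) (tgt_h pw : Int)
    (n m : Nat) (i : Nat) (w : Int) : List Int :=
  if _ : i ≤ n - m then
    if w = tgt_h ∧ PySem.List.slice toks (some (i : Int)) (some ((i : Int) + (m : Int))) = target then
      [(i : Int), (i : Int) + (m : Int)]
    else
      tokenB_go toks target hs tgt_h pw n m (i + 1)
        (if i + m < n then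
          PySem.Int.mod ((w - hs.getD i 0 * pw) * pvBASE + hs.getD (i + m) 0) pvMOD
        else w)
  else [0, 0]
termination_by n - m + 1 - i
decreasing_by omega

def token_start_end_alt (tokenizedTokens : List String) (target : List String) : List Int :=
  if target = [] then [0, 0]
  else
    let n := tokenizedTokens.length
    let m := target.length
    if m > n then [0, 0]
    else
      let hs := tokenizedTokens.map tokenHash
      let tgt_h := seqHash (target.map tokenHash)
      let w := seqHash (PySem.List.slice hs none (some (m : Int)))   -- hs[:m]
      let pw := pvPowMod pvBASE (m - 1) pvMOD
      tokenB_go tokenizedTokens target hs tgt_h pw n m 0 w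

-- ===== PRECONDITION & SPEC =====
def Spec_token_start_end (tokenizedTokens : List String) (target : List String) (out : List Int) : Prop := out = token_start_end_alt tokenizedTokens target
instance (tokenizedTokens : List String) (target : List String) (out : List Int) : Decidable (Spec_token_start_end tokenizedTokens target out) := by unfold Spec_token_start_end; infer_instance

-- ===== CLAIM (what is proved, stated in full; the proofs are below) =====
def Claim_equal_token_start_end : Prop := ∀ (tokenizedTokens : List String) (target : List String), Dom_token_start_end tokenizedTokens target → Spec_token_start_end tokenizedTokens target (token_start_end tokenizedTokens target)

-- ===== LEMMAS AND PROOFS =====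

-- reference: first index i (scanning upward) whose window of length m equals target
def firstHit (toks target : List String) (i : Nat) : List Int :=
  if h : i + target.length ≤ toks.length then
    if (toks.drop i).take target.length = target then
      [(i : Int), (i : Int) + (target.length : Int)]
    else firstHit toks target (i + 1)
  else [0, 0]
termination_by toks.length + 1 - i
decreasing_by omega

lemma firstHit_stop (toks target : List String) (i : Nat)
    (h : ¬ (i + target.length ≤ toks.length)) : firstHit toks target i = [0, 0] := by
  rw [firstHit, dif_neg h]

-- ----- A = firstHit -----
lemma tokenA_eq_firstHit (toks target : List String) (htgt : target ≠ []) :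
    ∀ i, tokenA_go toks target i (toks.drop i) = firstHit toks target i := by
  intro i
  induction hW : toks.length + 1 - i using Nat.strong_induction_on generalizing i with
  | _ W ih =>
  have hm1 : 1 ≤ target.length := List.length_pos_iff.2 htgt
  by_cases hin : i < toks.length
  · have hcons : toks.drop i = toks[i] :: toks.drop (i + 1) := List.drop_eq_getElem_cons hin
    have hslice : PySem.List.slice toks (some (i : Int)) (some ((i : Int) + (target.length : Int)))
        = (toks.drop i).take target.length := PySem.List.slice_natCast_add ..
    by_cases hle : i + target.length ≤ toks.length
    · by_cases hwin : (toks.drop i).take target.length = target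
      · -- match here: both return [i, i+m]
        have hhead : toks[i] = target.headI := by
          have : (toks.drop i).take target.length
              = toks[i] :: (toks.drop (i + 1)).take (target.length - 1) := by
            rw [hcons]
            conv_lhs => rw [show target.length = (target.length - 1) + 1 from by omega]
            rw [List.take_succ_cons]
          rw [hwin] at this
          rw [this]; rfl
        have hguard : toks[i] = target.headI ∧
            (i : Int) ≤ (toks.length : Int) - (target.length : Int) :=
          ⟨hhead, by omega⟩
        rw [hcons, tokenA_go, if_pos hguard, if_pos (by rw [hslice, hwin]),
            firstHit, dif_pos hle, if_pos hwin]
      · -- no match here: both recurse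
        have hrec : tokenA_go toks target i (toks.drop i)
            = tokenA_go toks target (i + 1) (toks.drop (i + 1)) := by
          rw [hcons, tokenA_go]
          by_cases hguard : toks[i] = target.headI ∧
              (i : Int) ≤ (toks.length : Int) - (target.length : Int)
          · rw [if_pos hguard, if_neg (by rw [hslice]; exact fun h => hwin h.symm)]
          · rw [if_neg hguard]
        rw [hrec, ih (toks.length + 1 - (i + 1)) (by omega) (i + 1) rfl]
        conv_rhs => rw [firstHit]
        rw [dif_pos hle, if_neg hwin]
    · -- past the last feasible start: A's guard can never fire again
      have hguardF : ¬ (toks[i] = target.headI ∧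
          (i : Int) ≤ (toks.length : Int) - (target.length : Int)) := by
        rintro ⟨-, habs⟩
        omega
      have hrec : tokenA_go toks target i (toks.drop i)
          = tokenA_go toks target (i + 1) (toks.drop (i + 1)) := by
        rw [hcons, tokenA_go, if_neg hguardF]
      rw [hrec, ih (toks.length + 1 - (i + 1)) (by omega) (i + 1) rfl,
          firstHit_stop _ _ _ (by omega), firstHit_stop _ _ _ hle]
  · have hnil : toks.drop i = [] := List.drop_eq_nil_of_le (by omega)
    rw [hnil]
    rw [firstHit_stop _ _ _ (by omega)]
    rfl

-- ----- hash algebra -----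
lemma pvMod_eq_emod (a : Int) : PySem.Int.mod a pvMOD = a % pvMOD :=
  PySem.Int.mod_eq_emod_of_pos (by norm_num [pvMOD])

def poly (xs : List Int) : Int := xs.foldl (fun a x => a * pvBASE + x) 0

lemma seqHash_foldl (xs : List Int) : ∀ a : Int,
    xs.foldl (fun h x => PySem.Int.mod (h * pvBASE + x) pvMOD) (a % pvMOD)
      = (xs.foldl (fun h x => h * pvBASE + x) a) % pvMOD := by
  induction xs with
  | nil => intro a; rfl
  | cons x xs ih =>
    intro a
    have hstep : PySem.Int.mod ((a % pvMOD) * pvBASE + x) pvMOD = (a * pvBASE + x) % pvMOD := by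
      rw [pvMod_eq_emod]
      exact Int.ModEq.add_right x (Int.ModEq.mul_right pvBASE (Int.emod_emod_of_dvd a dvd_rfl))
    simp only [List.foldl_cons, hstep, ih]

lemma seqHash_eq_poly (xs : List Int) : seqHash xs = poly xs % pvMOD := by
  have h := seqHash_foldl xs 0
  rw [Int.zero_emod] at h
  exact h

lemma poly_foldl_shift (xs : List Int) : ∀ a : Int,
    xs.foldl (fun h x => h * pvBASE + x) a = a * pvBASE ^ xs.length + poly xs := by
  induction xs with
  | nil => intro a; simp [poly]
  | cons x xs ih =>
    intro a
    have hx : poly (x :: xs) = x * pvBASE ^ xs.length + poly xs := by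
      have := ih x
      simpa [poly] using this
    simp only [List.foldl_cons, ih (a * pvBASE + x), hx, List.length_cons, pow_succ]
    ring

lemma poly_cons (x : Int) (xs : List Int) :
    poly (x :: xs) = x * pvBASE ^ xs.length + poly xs := by
  have := poly_foldl_shift xs x
  simpa [poly] using this

lemma poly_append_singleton (xs : List Int) (y : Int) :
    poly (xs ++ [y]) = poly xs * pvBASE + y := by
  simp [poly, List.foldl_append]

-- rolling step: hash of the next window from the hash of this one
lemma window_roll (hs : List Int) (m i : Nat) (hm : 1 ≤ m) (hin : i + m < hs.length) :
    seqHash ((hs.drop (i + 1)).take m)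
      = PySem.Int.mod
          ((seqHash ((hs.drop i).take m) - hs.getD i 0 * pvPowMod pvBASE (m - 1) pvMOD) * pvBASE
            + hs.getD (i + m) 0) pvMOD := by
  have hi : i < hs.length := by omega
  have him : i + m < hs.length := hin
  set rest := (hs.drop (i + 1)).take (m - 1) with hrest
  have hlrest : rest.length = m - 1 := by
    simp [hrest]; omega
  have e1 : (hs.drop i).take m = hs[i] :: rest := by
    rw [List.drop_eq_getElem_cons hi]
    have hm' : m = (m - 1) + 1 := by omega
    rw [hm', List.take_succ_cons]
  have e2 : (hs.drop (i + 1)).take m = rest ++ [hs[i + m]] := by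
    conv_lhs => rw [show m = (m - 1) + 1 from by omega]
    rw [List.take_add_one]
    congr 1
    have hlt : m - 1 < (hs.drop (i + 1)).length := by simp; omega
    rw [List.getElem?_eq_getElem hlt]
    have : (hs.drop (i + 1))[m - 1] = hs[(i + 1) + (m - 1)] := by
      rw [List.getElem_drop]
    rw [this]
    simp
    congr 1
    omega
  have hgd1 : hs.getD i 0 = hs[i] := List.getD_eq_getElem hs 0 hi
  have hgd2 : hs.getD (i + m) 0 = hs[i + m] := List.getD_eq_getElem hs 0 him
  rw [e1, e2, seqHash_eq_poly, seqHash_eq_poly, poly_append_singleton, poly_cons, hlrest,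
      hgd1, hgd2, pvMod_eq_emod]
  unfold pvPowMod
  rw [pvMod_eq_emod]
  -- both sides are the same value mod pvMOD
  symm
  calc (((hs[i] * pvBASE ^ (m - 1) + poly rest) % pvMOD
          - hs[i] * (pvBASE ^ (m - 1) % pvMOD)) * pvBASE + hs[i + m]) % pvMOD
      = (((hs[i] * pvBASE ^ (m - 1) + poly rest)
          - hs[i] * pvBASE ^ (m - 1)) * pvBASE + hs[i + m]) % pvMOD := by
        exact Int.ModEq.add_right _ (Int.ModEq.mul_right _
          (Int.ModEq.sub (Int.emod_emod_of_dvd _ dvd_rfl)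
            (Int.ModEq.mul_left _ (Int.emod_emod_of_dvd _ dvd_rfl))))
    _ = (poly rest * pvBASE + hs[i + m]) % pvMOD := by ring_nf

-- ----- B = firstHit -----
lemma tokenB_eq_firstHit (toks target : List String) (htgt : target ≠ [])
    (hmn : target.length ≤ toks.length) :
    ∀ i, tokenB_go toks target (toks.map tokenHash) (seqHash (target.map tokenHash))
          (pvPowMod pvBASE (target.length - 1) pvMOD) toks.length target.length i
          (seqHash (((toks.map tokenHash).drop i).take target.length))
        = firstHit toks target i := by
  intro i
  have hm1 : 1 ≤ target.length := List.length_pos_iff.2 htgt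
  induction hW : toks.length - target.length + 1 - i using Nat.strong_induction_on generalizing i with
  | _ W ih =>
  by_cases hi : i ≤ toks.length - target.length
  · have hile : i + target.length ≤ toks.length := by omega
    have hslice : PySem.List.slice toks (some (i : Int)) (some ((i : Int) + (target.length : Int)))
        = (toks.drop i).take target.length := PySem.List.slice_natCast_add ..
    by_cases hwin : (toks.drop i).take target.length = target
    · -- slice matches ⇒ the window hash matches too ⇒ both return [i, i+m]
      have hhash : ((toks.map tokenHash).drop i).take target.length = target.map tokenHash := by
        rw [← List.map_drop, ← List.map_take, hwin]
      rw [tokenB_go, dif_pos hi, if_pos ⟨by rw [hhash], by rw [hslice, hwin]⟩,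
          firstHit, dif_pos hile, if_pos hwin]
    · have hcond : ¬ (seqHash (((toks.map tokenHash).drop i).take target.length)
            = seqHash (target.map tokenHash) ∧
          PySem.List.slice toks (some (i : Int)) (some ((i : Int) + (target.length : Int))) = target) := by
        rintro ⟨-, habs⟩
        exact hwin (hslice ▸ habs)
      rw [tokenB_go, dif_pos hi, if_neg hcond]
      by_cases hlast : i + target.length < toks.length
      · -- roll the hash and recurse
        rw [if_pos hlast,
            ← window_roll (toks.map tokenHash) target.length i hm1 (by simpa using hlast),
            ih (toks.length - target.length + 1 - (i + 1)) (by omega) (i + 1) rfl]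
        conv_rhs => rw [firstHit]
        rw [dif_pos hile, if_neg hwin]
      · -- i = toks.length - target.length: next iteration is out of range on both sides
        rw [if_neg hlast, tokenB_go, dif_neg (by omega)]
        conv_rhs => rw [firstHit]
        rw [dif_pos hile, if_neg hwin, firstHit_stop _ _ _ (by omega)]
  · rw [tokenB_go, dif_neg hi, firstHit_stop _ _ _ (by omega)]

-- ===== VERDICT (by name: the statement is the Claim_ definition above) =====
theorem token_start_end_spec : Claim_equal_token_start_end := by
  intro toks target _
  unfold Spec_token_start_end token_start_end token_start_end_alt
  by_cases htgt : target = []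
  · simp [htgt]
  · simp only [htgt, if_false]
    by_cases hmn : target.length > toks.length
    · -- target longer than the text: A never fires its guard, B returns immediately
      rw [if_pos hmn]
      have := tokenA_eq_firstHit toks target htgt 0
      rw [List.drop_zero] at this
      rw [this, firstHit_stop _ _ _ (by omega)]
    · rw [if_neg hmn]
      have hA := tokenA_eq_firstHit toks target htgt 0
      rw [List.drop_zero] at hA
      have hB := tokenB_eq_firstHit toks target htgt (by omega) 0
      rw [List.drop_zero] at hB
      rw [hA, ← hB]
      congr 1
      rw [PySem.List.slice_to_natCast]
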